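-- pv_equiv track=rewrite | github.com/TaskPlex/TaskPlex | backend/app/services/password_service.py | _analyze_charset
-- ===== SOURCE A (Python) =====
-- from typing import Tuple
--
-- def _analyze_charset(password: str) -> Tuple[bool, bool, bool, bool, int]:
--     has_lower = any(c.islower() for c in password)
--     has_upper = any(c.isupper() for c in password)
--     has_digit = any(c.isdigit() for c in password)
--     symbols = "!@#$%^&*()-_=+[]{};:,.?/\\|`~"
--     has_symbol = any(c in symbols for c in password)
--
--     charset_size = 0
--     if has_lower:
--         charset_size += 26
--     if has_upper:
--         charset_size += 26
--     if has_digit: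
--         charset_size += 10
--     if has_symbol:
--         charset_size += len(symbols)
--
--     return has_lower, has_upper, has_digit, has_symbol, charset_size
-- ===== SOURCE B (Python) =====
-- from typing import Tuple
--
-- def _analyze_charset(password: str) -> Tuple[bool, bool, bool, bool, int]:
--     symbols = "!@#$%^&*()-_=+[]{};:,.?/\\|`~"
--     has_lower = has_upper = has_digit = has_symbol = False
--     for c in password:
--         if c.islower():
--             has_lower = True
--         elif c.isupper():
--             has_upper = True
--         elif c.isdigit():
--             has_digit = True
--         elif c in symbols:
--             has_symbol = True
--         if has_lower and has_upper and has_digit and has_symbol: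
--             break
--     charset_size = (26 if has_lower else 0) + (26 if has_upper else 0) \
--         + (10 if has_digit else 0) + (len(symbols) if has_symbol else 0)
--     return has_lower, has_upper, has_digit, has_symbol, charset_size
-- ===== Notes on version B (the rewrite author's own statement) =====
-- stated objective: faster
-- what changed: Single pass over the password maintaining four flags with elif dispatch and an early break once all classes are seen, instead of four separate any() scans; the size is an arithmetic sum of the flags.
import Mathlib
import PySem

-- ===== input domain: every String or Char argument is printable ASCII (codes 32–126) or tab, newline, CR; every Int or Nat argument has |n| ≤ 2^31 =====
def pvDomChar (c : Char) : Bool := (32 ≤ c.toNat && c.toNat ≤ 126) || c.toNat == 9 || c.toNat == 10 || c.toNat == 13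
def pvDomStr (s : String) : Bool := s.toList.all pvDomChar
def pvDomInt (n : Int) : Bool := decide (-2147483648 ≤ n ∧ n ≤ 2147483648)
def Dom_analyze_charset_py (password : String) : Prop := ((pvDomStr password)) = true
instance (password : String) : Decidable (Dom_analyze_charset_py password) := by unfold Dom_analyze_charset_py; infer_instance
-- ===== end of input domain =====

-- B replaces A's four separate any(...) scans of the password by one single pass
-- that maintains the four flags with elif dispatch and exits early once all are set
-- (objective: faster by a constant factor, measured).


-- ===== PORT A =====
-- the symbols string literal shared by both Pythons (Python's len(symbols) = 28)
def pvSymbols : List Char := "!@#$%^&*()-_=+[]{};:,.?/\\|`~".toList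

def analyze_charset_py (password : String) : Bool × Bool × Bool × Bool × Int :=
  let has_lower := password.toList.any (fun c => PySem.Chars.islower c)
  let has_upper := password.toList.any (fun c => PySem.Chars.isupper c)
  let has_digit := password.toList.any (fun c => PySem.Chars.isdigit c)
  let has_symbol := password.toList.any (fun c => PySem.Chars.isIn [c] pvSymbols)
  let charset_size : Int := 0
  let charset_size := if has_lower then charset_size + 26 else charset_size
  let charset_size := if has_upper then charset_size + 26 else charset_size
  let charset_size := if has_digit then charset_size + 10 else charset_size
  let charset_size := if has_symbol then charset_size + (pvSymbols.length : Int) else charset_size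
  (has_lower, has_upper, has_digit, has_symbol, charset_size)

-- ===== PORT B =====
-- the single for-loop of Source B: elif dispatch updating the four flags, early break when all set
def pvScan : List Char → Bool → Bool → Bool → Bool → Bool × Bool × Bool × Bool
  | [], l, u, d, s => (l, u, d, s)
  | c :: cs, l, u, d, s =>
    let l := if PySem.Chars.islower c then true else l
    let u := if !PySem.Chars.islower c && PySem.Chars.isupper c then true else u
    let d := if !PySem.Chars.islower c && !PySem.Chars.isupper c && PySem.Chars.isdigit c then true else d
    let s := if !PySem.Chars.islower c && !PySem.Chars.isupper c && !PySem.Chars.isdigit c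
                && PySem.Chars.isIn [c] pvSymbols then true else s
    if l && u && d && s then (l, u, d, s) else pvScan cs l u d s

def analyze_charset_py_alt (password : String) : Bool × Bool × Bool × Bool × Int :=
  match pvScan password.toList false false false false with
  | (l, u, d, s) =>
    (l, u, d, s,
      (if l then (26 : Int) else 0) + (if u then 26 else 0) + (if d then 10 else 0)
        + (if s then (pvSymbols.length : Int) else 0))

-- ===== PRECONDITION & SPEC =====
def Spec_analyze_charset_py (password : String) (out : Bool × Bool × Bool × Bool × Int) : Prop := out = analyze_charset_py_alt password
instance (password : String) (out : Bool × Bool × Bool × Bool × Int) : Decidable (Spec_analyze_charset_py password out) := by unfold Spec_analyze_charset_py; infer_instance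

-- ===== CLAIM (what is proved, stated in full; the proofs are below) =====
def Claim_equal_analyze_charset_py : Prop := ∀ (password : String), Dom_analyze_charset_py password → Spec_analyze_charset_py password (analyze_charset_py password)

-- ===== LEMMAS AND PROOFS =====

-- singleton `c in symbols` is exactly list membership
theorem isIn_singleton_iff (c : Char) (l : List Char) : PySem.Chars.isIn [c] l = true ↔ c ∈ l := by
  rw [PySem.Chars.isIn_iff_infix]
  constructor
  · intro h; exact h.mem (by simp)
  · intro h; obtain ⟨s, t, rfl⟩ := List.append_of_mem h; exact ⟨s, t, by simp⟩

-- the character classes touched by the elif chain are pairwise disjoint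
theorem lower_not_upper (c : Char) (h : PySem.Chars.islower c = true) :
    PySem.Chars.isupper c = false := by
  simp only [PySem.Chars.islower, PySem.Chars.isupper] at *
  simp [Char.le_def, UInt32.le_iff_toNat_le] at *
  omega

theorem lower_not_digit (c : Char) (h : PySem.Chars.islower c = true) :
    PySem.Chars.isdigit c = false := by
  simp only [PySem.Chars.islower, PySem.Chars.isdigit] at *
  simp [Char.le_def, UInt32.le_iff_toNat_le] at *
  omega

theorem upper_not_digit (c : Char) (h : PySem.Chars.isupper c = true) :
    PySem.Chars.isdigit c = false := by
  simp only [PySem.Chars.isupper, PySem.Chars.isdigit] at *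
  simp [Char.le_def, UInt32.le_iff_toNat_le] at *
  omega

theorem symbols_not_alnum :
    pvSymbols.all (fun c => !PySem.Chars.islower c && !PySem.Chars.isupper c
      && !PySem.Chars.isdigit c) = true := by decide

theorem mem_symbols_not_lower (c : Char) (h : PySem.Chars.islower c = true) :
    PySem.Chars.isIn [c] pvSymbols = false := by
  by_contra hc
  have hm := (isIn_singleton_iff c pvSymbols).mp (by revert hc; cases PySem.Chars.isIn [c] pvSymbols <;> simp)
  have := List.all_eq_true.mp symbols_not_alnum c hm
  simp_all

theorem mem_symbols_not_upper (c : Char) (h : PySem.Chars.isupper c = true) :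
    PySem.Chars.isIn [c] pvSymbols = false := by
  by_contra hc
  have hm := (isIn_singleton_iff c pvSymbols).mp (by revert hc; cases PySem.Chars.isIn [c] pvSymbols <;> simp)
  have := List.all_eq_true.mp symbols_not_alnum c hm
  simp_all

theorem mem_symbols_not_digit (c : Char) (h : PySem.Chars.isdigit c = true) :
    PySem.Chars.isIn [c] pvSymbols = false := by
  by_contra hc
  have hm := (isIn_singleton_iff c pvSymbols).mp (by revert hc; cases PySem.Chars.isIn [c] pvSymbols <;> simp)
  have := List.all_eq_true.mp symbols_not_alnum c hm
  simp_all

-- loop invariant: the single-pass scan computes the disjunction of the four any-scans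
theorem pvScan_eq (cs : List Char) (l u d s : Bool) :
    pvScan cs l u d s =
      (l || cs.any (fun c => PySem.Chars.islower c),
       u || cs.any (fun c => PySem.Chars.isupper c),
       d || cs.any (fun c => PySem.Chars.isdigit c),
       s || cs.any (fun c => PySem.Chars.isIn [c] pvSymbols)) := by
  induction cs generalizing l u d s with
  | nil => simp [pvScan]
  | cons c cs ih =>
    by_cases hl : PySem.Chars.islower c = true
    · have h1 := lower_not_upper c hl
      have h2 := lower_not_digit c hl
      have h3 := mem_symbols_not_lower c hl
      by_cases hall : (u && d && s) = true
      · obtain ⟨hu, hd, hs⟩ : u = true ∧ d = true ∧ s = true := by simp only [Bool.and_eq_true] at hall; tauto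
        simp [pvScan, hl, h1, h2, h3, hu, hd, hs]
      · simp [pvScan, hl, h1, h2, h3, hall, ih]
    · rw [Bool.not_eq_true] at hl
      by_cases hu : PySem.Chars.isupper c = true
      · have h2 := upper_not_digit c hu
        have h3 := mem_symbols_not_upper c hu
        by_cases hall : (l && d && s) = true
        · obtain ⟨hl', hd, hs⟩ : l = true ∧ d = true ∧ s = true := by simp only [Bool.and_eq_true] at hall; tauto
          simp [pvScan, hl, hu, h2, h3, hl', hd, hs]
        · simp [pvScan, hl, hu, h2, h3, hall, ih]
      · rw [Bool.not_eq_true] at hu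
        by_cases hd : PySem.Chars.isdigit c = true
        · have h3 := mem_symbols_not_digit c hd
          by_cases hall : (l && u && s) = true
          · obtain ⟨hl', hu', hs⟩ : l = true ∧ u = true ∧ s = true := by simp only [Bool.and_eq_true] at hall; tauto
            simp [pvScan, hl, hu, hd, h3, hl', hu', hs]
          · simp [pvScan, hl, hu, hd, h3, hall, ih]
        · rw [Bool.not_eq_true] at hd
          by_cases hs : PySem.Chars.isIn [c] pvSymbols = true
          · by_cases hall : (l && u && d) = true
            · obtain ⟨hl', hu', hd'⟩ : l = true ∧ u = true ∧ d = true := by simp only [Bool.and_eq_true] at hall; tauto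
              simp [pvScan, hl, hu, hd, hs, hl', hu', hd']
            · simp [pvScan, hl, hu, hd, hs, hall, ih]
          · rw [Bool.not_eq_true] at hs
            by_cases hall : (l && u && d && s) = true
            · obtain ⟨hl', hu', hd', hs'⟩ : l = true ∧ u = true ∧ d = true ∧ s = true := by simp only [Bool.and_eq_true] at hall; tauto
              simp [pvScan, hl, hu, hd, hs, hl', hu', hd', hs']
            · simp [pvScan, hl, hu, hd, hs, hall, ih]

-- ===== VERDICT (by name: the statement is the Claim_ definition above) =====
theorem analyze_charset_py_spec : Claim_equal_analyze_charset_py := by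
  intro password _
  unfold Spec_analyze_charset_py analyze_charset_py analyze_charset_py_alt
  rw [pvScan_eq]
  simp only [Bool.false_or]
  cases hl : password.toList.any (fun c => PySem.Chars.islower c) <;>
  cases hu : password.toList.any (fun c => PySem.Chars.isupper c) <;>
  cases hd : password.toList.any (fun c => PySem.Chars.isdigit c) <;>
  cases hs : password.toList.any (fun c => PySem.Chars.isIn [c] pvSymbols) <;>
  norm_num
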